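-- pv_equiv track=rewrite | github.com/monzag/python-lightweight-erp-project-pylamas | ui.py | create_middle_row
-- ===== SOURCE A (Python) =====
-- def create_middle_row(table, columns_number, title_list, MIN_COLUMN_WIDTH, CELL_PADDING):
--     '''
--     Generates a string to be later printed as a middle row in a table.
--
--     Args:
--         table: list of lists of all the strings
--         columns_number: int
--         title_list: list of titles of columns that will be printed in a complete table
--         MIN_COLUMN_WIDTH: int
--         CELL_PADDING: int
--
--     Returns:
--         middle_row: string ready to be printed
--     '''
--     middle_row = '|'
--
--     for i in range(columns_number):
--         dashes_to_add = find_max_string_length(table, i, title_list)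
--         if dashes_to_add >= MIN_COLUMN_WIDTH:
--             middle_row = middle_row + ('-' * (dashes_to_add + CELL_PADDING) + '|')
--         else:
--             middle_row = middle_row + ('-' * MIN_COLUMN_WIDTH + '|')
--
--     return middle_row
--
-- def find_max_string_length(table, item_index, title_list):
--     '''
--     Finds longest string from all items with a specific index that will be printed in one column
--
--     Args:
--         table: list of lists of all the strings
--         item_index: int (specific index in lists in table)
--         title_list: list of titles of columns that will be printed in a complete table
--
--     Returns:
--         int (longest length value for a given index)
--     '''
--     longest_string = ''
--
--     for a_list in table:
--         if len(str(a_list[item_index])) > len(longest_string):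
--             longest_string = str(a_list[item_index])
--
--     if len(str(title_list[item_index])) > len(longest_string):
--         longest_string = str(title_list[item_index])
--
--     longest_value = len(longest_string)
--
--     return longest_value
-- ===== SOURCE B (Python) =====
-- def create_middle_row(table, columns_number, title_list, MIN_COLUMN_WIDTH, CELL_PADDING):
--     '''
--     Same result as A, by a different decomposition: one pass over the rows
--     maintaining per-column maxima, then a formatting pass over those widths.
--     '''
--     max_widths = [len(str(title_list[i])) for i in range(columns_number)]
--     for a_list in table:
--         max_widths = [max(max_widths[i], len(str(a_list[i]))) for i in range(columns_number)]
--     middle_row = '|'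
--     for w in max_widths:
--         if w >= MIN_COLUMN_WIDTH:
--             middle_row += '-' * (w + CELL_PADDING) + '|'
--         else:
--             middle_row += '-' * MIN_COLUMN_WIDTH + '|'
--     return middle_row
-- ===== Notes on version B (the rewrite author's own statement) =====
-- stated objective: simpler
-- what changed: Replaces the per-column helper that rescans the whole table for every column with a single row-wise pass maintaining a max_widths list (titles as the initial values), followed by a separate formatting pass over those widths.
import Mathlib
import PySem

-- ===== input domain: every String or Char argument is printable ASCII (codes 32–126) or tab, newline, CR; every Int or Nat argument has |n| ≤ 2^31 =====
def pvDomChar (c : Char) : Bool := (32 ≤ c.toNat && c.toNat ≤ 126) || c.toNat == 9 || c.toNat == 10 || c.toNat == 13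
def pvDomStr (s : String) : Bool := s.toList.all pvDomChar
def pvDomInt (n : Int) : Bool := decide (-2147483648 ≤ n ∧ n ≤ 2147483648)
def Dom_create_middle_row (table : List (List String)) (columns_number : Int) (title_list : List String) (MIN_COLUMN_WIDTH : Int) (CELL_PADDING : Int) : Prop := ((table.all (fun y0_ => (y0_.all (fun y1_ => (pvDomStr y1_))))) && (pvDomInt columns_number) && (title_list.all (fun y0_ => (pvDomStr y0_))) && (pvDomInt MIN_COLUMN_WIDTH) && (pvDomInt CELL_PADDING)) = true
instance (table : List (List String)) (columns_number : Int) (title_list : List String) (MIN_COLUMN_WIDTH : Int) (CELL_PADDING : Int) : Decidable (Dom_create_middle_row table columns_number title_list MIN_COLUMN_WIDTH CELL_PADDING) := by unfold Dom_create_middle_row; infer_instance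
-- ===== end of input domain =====

-- B replaces A's per-column table rescans by one row-wise pass maintaining per-column maxima
-- plus a separate formatting pass (simpler decomposition; same cost).
-- Ports build the row as a List Char and wrap it with String.mk at the end (exact: Python str
-- concatenation of these ASCII pieces is list append on code points); str(x) on a str is the
-- identity and is ported as such; '-' * n is PySem.List.pyRepeat ['-'] n (n < 0 gives '').
-- Indexing a_list[i]/title_list[i] is ported with PySem.List.pyGetD (total form); Pre_ restricts
-- to the inputs where every index is in range, i.e. exactly where Python A raises no IndexError.

-- ===== PORT A =====
-- helper find_max_string_length, transliterated: keeps the longest STRING, then takes its length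
def pvFindMax (table : List (List String)) (item_index : Int) (title_list : List String) : Int :=
  let longest := table.foldl (fun longest_string a_list =>
    if PySem.Str.len (PySem.List.pyGetD a_list item_index "") > PySem.Str.len longest_string then
      PySem.List.pyGetD a_list item_index ""
    else longest_string) ""
  let longest :=
    if PySem.Str.len (PySem.List.pyGetD title_list item_index "") > PySem.Str.len longest then
      PySem.List.pyGetD title_list item_index ""
    else longest
  PySem.Str.len longest

def create_middle_row (table : List (List String)) (columns_number : Int) (title_list : List String) (MIN_COLUMN_WIDTH : Int) (CELL_PADDING : Int) : String :=
  let middle_row := (PySem.List.pyRange 0 columns_number 1).foldl (fun middle_row i =>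
    let dashes_to_add := pvFindMax table i title_list
    if dashes_to_add ≥ MIN_COLUMN_WIDTH then
      middle_row ++ (PySem.List.pyRepeat ['-'] (dashes_to_add + CELL_PADDING) ++ ['|'])
    else
      middle_row ++ (PySem.List.pyRepeat ['-'] MIN_COLUMN_WIDTH ++ ['|'])) ['|']
  String.ofList middle_row

-- ===== PORT B =====
def create_middle_row_alt (table : List (List String)) (columns_number : Int) (title_list : List String) (MIN_COLUMN_WIDTH : Int) (CELL_PADDING : Int) : String :=
  let max_widths := (PySem.List.pyRange 0 columns_number 1).map
    (fun i => PySem.Str.len (PySem.List.pyGetD title_list i ""))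
  let max_widths := table.foldl (fun max_widths a_list =>
    (PySem.List.pyRange 0 columns_number 1).map
      (fun i => max (PySem.List.pyGetD max_widths i 0)
                    (PySem.Str.len (PySem.List.pyGetD a_list i "")))) max_widths
  let middle_row := max_widths.foldl (fun middle_row w =>
    if w ≥ MIN_COLUMN_WIDTH then
      middle_row ++ (PySem.List.pyRepeat ['-'] (w + CELL_PADDING) ++ ['|'])
    else
      middle_row ++ (PySem.List.pyRepeat ['-'] MIN_COLUMN_WIDTH ++ ['|'])) ['|']
  String.ofList middle_row

-- ===== PRECONDITION & SPEC =====
-- Exactly the inputs on which Python A returns: when columns_number > 0 every row of the table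
-- and the title list must have at least columns_number entries, else A raises IndexError.
def Pre_create_middle_row (table : List (List String)) (columns_number : Int) (title_list : List String) (MIN_COLUMN_WIDTH : Int) (CELL_PADDING : Int) : Prop :=
  0 < columns_number →
    (columns_number ≤ (title_list.length : Int) ∧
     ∀ row ∈ table, columns_number ≤ (row.length : Int))
instance (table : List (List String)) (columns_number : Int) (title_list : List String) (MIN_COLUMN_WIDTH : Int) (CELL_PADDING : Int) : Decidable (Pre_create_middle_row table columns_number title_list MIN_COLUMN_WIDTH CELL_PADDING) := by unfold Pre_create_middle_row; infer_instance

def pvWitness_create_middle_row : List (List String) × Int × List String × Int × Int :=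
  ([["ab", "c"], ["x", "yyy"]], 2, ["id", "name"], 3, 1)

def Spec_create_middle_row (table : List (List String)) (columns_number : Int) (title_list : List String) (MIN_COLUMN_WIDTH : Int) (CELL_PADDING : Int) (out : String) : Prop := out = create_middle_row_alt table columns_number title_list MIN_COLUMN_WIDTH CELL_PADDING
instance (table : List (List String)) (columns_number : Int) (title_list : List String) (MIN_COLUMN_WIDTH : Int) (CELL_PADDING : Int) (out : String) : Decidable (Spec_create_middle_row table columns_number title_list MIN_COLUMN_WIDTH CELL_PADDING out) := by unfold Spec_create_middle_row; infer_instance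

-- ===== CLAIM (what is proved, stated in full; the proofs are below) =====
def Claim_equal_create_middle_row : Prop := ∀ (table : List (List String)) (columns_number : Int) (title_list : List String) (MIN_COLUMN_WIDTH : Int) (CELL_PADDING : Int), Dom_create_middle_row table columns_number title_list MIN_COLUMN_WIDTH CELL_PADDING → Pre_create_middle_row table columns_number title_list MIN_COLUMN_WIDTH CELL_PADDING → Spec_create_middle_row table columns_number title_list MIN_COLUMN_WIDTH CELL_PADDING (create_middle_row table columns_number title_list MIN_COLUMN_WIDTH CELL_PADDING)

-- ===== LEMMAS AND PROOFS =====

-- A's string-keeping fold, measured: its length is the running max of the cell widths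
lemma findMax_fold_len (table : List (List String)) (i : Int) (s0 : String) :
    PySem.Str.len (table.foldl (fun longest_string a_list =>
      if PySem.Str.len (PySem.List.pyGetD a_list i "") > PySem.Str.len longest_string then
        PySem.List.pyGetD a_list i ""
      else longest_string) s0)
    = table.foldl (fun m a_list => max m (PySem.Str.len (PySem.List.pyGetD a_list i ""))) (PySem.Str.len s0) := by
  induction table generalizing s0 with
  | nil => simp
  | cons r rest ih =>
    simp only [List.foldl_cons]
    split_ifs with h
    · rw [ih]; congr 1; omega
    · rw [ih]; congr 1; omega

-- a max-fold started at (max a b) pulls a out front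
lemma foldl_max_pull (table : List (List String)) (i : Int) (a b : Int) :
    table.foldl (fun m a_list => max m (PySem.Str.len (PySem.List.pyGetD a_list i ""))) (max a b)
    = max a (table.foldl (fun m a_list => max m (PySem.Str.len (PySem.List.pyGetD a_list i ""))) b) := by
  induction table generalizing b with
  | nil => simp
  | cons r rest ih =>
    simp only [List.foldl_cons]
    rw [max_assoc, ih]

-- A's helper equals B's per-column running max started from the title width
lemma findMax_eq (table : List (List String)) (i : Int) (title_list : List String) :
    pvFindMax table i title_list
    = table.foldl (fun m a_list => max m (PySem.Str.len (PySem.List.pyGetD a_list i "")))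
        (PySem.Str.len (PySem.List.pyGetD title_list i "")) := by
  unfold pvFindMax
  simp only
  rw [apply_ite PySem.Str.len, findMax_fold_len]
  have hs : PySem.Str.len ("" : String) = (0 : Int) := by simp [PySem.Str.len_eq]
  rw [hs]
  set t := PySem.Str.len (PySem.List.pyGetD title_list i "") with ht
  set L := table.foldl (fun m a_list => max m (PySem.Str.len (PySem.List.pyGetD a_list i ""))) 0 with hL
  have htn : (0 : Int) ≤ t := by rw [ht]; simp [PySem.Str.len_eq]
  have hpull : table.foldl (fun m a_list => max m (PySem.Str.len (PySem.List.pyGetD a_list i ""))) t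
      = max t L := by
    have h0 : t = max t 0 := by omega
    rw [h0, foldl_max_pull, hL]
    omega
  rw [hpull]
  split_ifs with h <;> omega

-- B's row-wise fold over the width list, characterised column-wise
lemma maxWidths_fold (table : List (List String)) (cn : Int) (h : Int → Int) :
    table.foldl (fun max_widths a_list =>
        (PySem.List.pyRange 0 cn 1).map
          (fun i => max (PySem.List.pyGetD max_widths i 0) (PySem.Str.len (PySem.List.pyGetD a_list i ""))))
      ((PySem.List.pyRange 0 cn 1).map h)
    = (PySem.List.pyRange 0 cn 1).map
        (fun i => table.foldl (fun m a_list => max m (PySem.Str.len (PySem.List.pyGetD a_list i ""))) (h i)) := by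
  induction table generalizing h with
  | nil => simp
  | cons r rest ih =>
    simp only [List.foldl_cons]
    have hstep : (PySem.List.pyRange 0 cn 1).map
        (fun i => max (PySem.List.pyGetD ((PySem.List.pyRange 0 cn 1).map h) i 0) (PySem.Str.len (PySem.List.pyGetD r i "")))
        = (PySem.List.pyRange 0 cn 1).map (fun i => max (h i) (PySem.Str.len (PySem.List.pyGetD r i ""))) := by
      apply List.map_congr_left
      intro i hi
      have hmem := (PySem.List.mem_pyRange_one).1 hi
      rw [PySem.List.pyGetD_map_pyRange_of_nonneg h cn i 0 hmem.1 hmem.2]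
    rw [hstep, ih]

theorem equal_all (table : List (List String)) (columns_number : Int) (title_list : List String) (MIN_COLUMN_WIDTH : Int) (CELL_PADDING : Int) :
    create_middle_row table columns_number title_list MIN_COLUMN_WIDTH CELL_PADDING
    = create_middle_row_alt table columns_number title_list MIN_COLUMN_WIDTH CELL_PADDING := by
  unfold create_middle_row create_middle_row_alt
  simp only
  rw [maxWidths_fold table columns_number
        (fun i => PySem.Str.len (PySem.List.pyGetD title_list i ""))]
  rw [List.foldl_map]
  refine congrArg String.ofList ?_
  apply PySem.List.foldl_congr_mem
  intro mr i _
  rw [findMax_eq]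

-- ===== VERDICT (by name: the statement is the Claim_ definition above) =====
theorem create_middle_row_spec : Claim_equal_create_middle_row := by
  intro table cn titles mw pad _ _
  unfold Spec_create_middle_row
  exact equal_all table cn titles mw pad
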